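-- pv_equiv track=rewrite | github.com/hyuno513/ComVisionnotebook | 컴비젼3/2026-2-20/3.데이터처리.py | get_value_count
-- ===== SOURCE A (Python) =====
-- def get_value_count(line):
--     line_rep_list = list()
--     for k, x in enumerate(line.split('"')):
--         if k % 2 != 0:
--             x = x.replace(',', '')
--         line_rep_list.append(x)
--
--     line_rep_str = ''.join(line_rep_list)
--     return len(line_rep_str.split(','))
-- ===== SOURCE B (Python) =====
-- def get_value_count(line):
--     in_quotes = False
--     count = 0
--     for ch in line:
--         if ch == '"':
--             in_quotes = not in_quotes
--         elif ch == ',' and not in_quotes: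
--             count += 1
--     return count + 1
-- ===== Notes on version B (the rewrite author's own statement) =====
-- stated objective: simpler
-- what changed: Replaces A's split-on-quote / strip-commas-in-odd-chunks / join / split-on-comma pipeline with a single left-to-right scan that toggles an in_quotes flag on each quote and counts commas seen outside quotes, returning count+1.
import Mathlib
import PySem

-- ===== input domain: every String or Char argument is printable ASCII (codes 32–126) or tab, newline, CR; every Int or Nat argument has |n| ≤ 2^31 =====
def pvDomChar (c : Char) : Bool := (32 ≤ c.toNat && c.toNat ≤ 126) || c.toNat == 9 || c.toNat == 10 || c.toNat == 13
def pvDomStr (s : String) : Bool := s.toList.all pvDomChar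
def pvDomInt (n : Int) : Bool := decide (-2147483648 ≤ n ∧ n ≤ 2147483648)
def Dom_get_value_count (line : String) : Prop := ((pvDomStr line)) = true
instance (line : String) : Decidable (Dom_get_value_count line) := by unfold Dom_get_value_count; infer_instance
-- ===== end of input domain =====

-- B replaces A's split-on-quote / strip-commas / join / split-on-comma pipeline with a single
-- scan that toggles an in_quotes flag and counts commas outside quotes; objective: simpler.

-- ===== PORT A =====
-- A transliterated at the Chars (list-of-code-points) level: split on '"', strip commas from
-- odd-indexed chunks (enumerate + foldl-append = the Python for/append loop), join, split on ','.
def get_value_count (line : String) : Int :=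
  let parts := PySem.Chars.splitOn line.toList ['"']
  let line_rep_list := (PySem.List.enumerate parts).foldl
      (fun (acc : List (List Char)) kx =>
        acc ++ [if PySem.Int.mod kx.1 2 ≠ 0 then PySem.Chars.replace kx.2 [','] [] else kx.2]) []
  let line_rep_str := PySem.Chars.join [] line_rep_list
  ((PySem.Chars.splitOn line_rep_str [',']).length : Int)

-- ===== PORT B =====
def get_value_count_alt (line : String) : Int :=
  let st := line.toList.foldl
      (fun (p : Bool × Int) ch =>
        if ch = '"' then (!p.1, p.2)
        else if ch = ',' ∧ p.1 = false then (p.1, p.2 + 1)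
        else p) (false, 0)
  st.2 + 1

-- ===== PRECONDITION & SPEC =====
def Spec_get_value_count (line : String) (out : Int) : Prop := out = get_value_count_alt line
instance (line : String) (out : Int) : Decidable (Spec_get_value_count line out) := by unfold Spec_get_value_count; infer_instance

-- ===== CLAIM (what is proved, stated in full; the proofs are below) =====
def Claim_equal_get_value_count : Prop := ∀ (line : String), Dom_get_value_count line → Spec_get_value_count line (get_value_count line)

-- ===== LEMMAS AND PROOFS =====

def consH (a : List Char) : List (List Char) → List (List Char)
  | [] => [a]
  | p :: ps => (a ++ p) :: ps

def splitC (q : Char) : List Char → List (List Char)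
  | [] => [[]]
  | c :: cs => if c = q then [] :: splitC q cs else consH [c] (splitC q cs)

theorem splitC_ne_nil (q : Char) (l : List Char) : splitC q l ≠ [] := by
  cases l with
  | nil => simp [splitC]
  | cons c cs =>
    simp only [splitC]
    split
    · simp
    · cases h : splitC q cs <;> simp [consH]

theorem go_split_spec (q : Char) :
    ∀ (fuel : Nat) (l : List Char), l.length ≤ fuel → ∀ (cur : List Char) (acc : List (List Char)),
      PySem.Chars.splitOn.go [q] fuel l cur acc = acc.reverse ++ consH cur.reverse (splitC q l) := by
  intro fuel
  induction fuel with
  | zero =>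
    intro l hl cur acc
    have : l = [] := by cases l <;> simp_all
    subst this
    simp [PySem.Chars.splitOn.go, splitC, consH]
  | succ f ih =>
    intro l hl cur acc
    cases l with
    | nil => simp [PySem.Chars.splitOn.go, splitC, consH]
    | cons c cs =>
      by_cases hc : c = q
      · subst hc
        rw [show PySem.Chars.splitOn.go [c] (f+1) (c::cs) cur acc
              = PySem.Chars.splitOn.go [c] f cs [] (cur.reverse :: acc) by
            simp [PySem.Chars.splitOn.go, List.isPrefixOf]]
        rw [ih cs (by simpa using hl) [] (cur.reverse :: acc)]
        simp only [splitC, if_pos rfl]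
        obtain ⟨p, ps, hp⟩ : ∃ p ps, splitC c cs = p :: ps := by
          cases h : splitC c cs with
          | nil => exact absurd h (splitC_ne_nil c cs)
          | cons p ps => exact ⟨p, ps, rfl⟩
        simp [hp, consH]
      · rw [show PySem.Chars.splitOn.go [q] (f+1) (c::cs) cur acc
              = PySem.Chars.splitOn.go [q] f cs (c :: cur) acc by
            simp [PySem.Chars.splitOn.go, List.isPrefixOf, Ne.symm hc]]
        rw [ih cs (by simpa using hl) (c :: cur) acc]
        simp only [splitC, if_neg hc]
        obtain ⟨p, ps, hp⟩ : ∃ p ps, splitC q cs = p :: ps := by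
          cases h : splitC q cs with
          | nil => exact absurd h (splitC_ne_nil q cs)
          | cons p ps => exact ⟨p, ps, rfl⟩
        simp [hp, consH]

theorem splitOn_single (q : Char) (l : List Char) :
    PySem.Chars.splitOn l [q] = splitC q l := by
  rw [PySem.Chars.splitOn, go_split_spec q (l.length+1) l (by omega) [] []]
  obtain ⟨p, ps, hp⟩ : ∃ p ps, splitC q l = p :: ps := by
    cases h : splitC q l with
    | nil => exact absurd h (splitC_ne_nil q l)
    | cons p ps => exact ⟨p, ps, rfl⟩
  simp [hp, consH]

theorem length_splitC (q : Char) (l : List Char) :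
    (splitC q l).length = l.count q + 1 := by
  induction l with
  | nil => simp [splitC]
  | cons c cs ih =>
    simp only [splitC]
    by_cases hc : c = q
    · subst hc; simp [List.count_cons, ih]
    · obtain ⟨p, ps, hp⟩ : ∃ p ps, splitC q cs = p :: ps := by
        cases h : splitC q cs with
        | nil => exact absurd h (splitC_ne_nil q cs)
        | cons p ps => exact ⟨p, ps, rfl⟩
      simp [hc, hp, consH, List.count_cons]
      simpa [hp] using ih

theorem go_replace_spec (q : Char) :
    ∀ (fuel : Nat) (l : List Char), l.length ≤ fuel → ∀ (acc : List Char),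
      PySem.Chars.replace.go [q] [] fuel l acc = acc.reverse ++ l.filter (· ≠ q) := by
  intro fuel
  induction fuel with
  | zero =>
    intro l hl acc
    have : l = [] := by cases l <;> simp_all
    subst this
    simp [PySem.Chars.replace.go]
  | succ f ih =>
    intro l hl acc
    cases l with
    | nil => simp [PySem.Chars.replace.go]
    | cons c cs =>
      by_cases hc : c = q
      · subst hc
        rw [show PySem.Chars.replace.go [c] [] (f+1) (c::cs) acc
              = PySem.Chars.replace.go [c] [] f cs acc by
            simp [PySem.Chars.replace.go, List.isPrefixOf]]
        rw [ih cs (by simpa using hl) acc]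
        simp
      · rw [show PySem.Chars.replace.go [q] [] (f+1) (c::cs) acc
              = PySem.Chars.replace.go [q] [] f cs (c :: acc) by
            simp [PySem.Chars.replace.go, List.isPrefixOf, Ne.symm hc]]
        rw [ih cs (by simpa using hl) (c :: acc)]
        simp [hc]

theorem replace_single (q : Char) (l : List Char) :
    PySem.Chars.replace l [q] [] = l.filter (· ≠ q) := by
  rw [PySem.Chars.replace]
  simp [go_replace_spec q l.length l le_rfl []]

theorem join_nil_flatten (L : List (List Char)) :
    PySem.Chars.join [] L = L.flatten := by
  induction L with
  | nil => simp [PySem.Chars.join, List.intercalate]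
  | cons x xs ih =>
    cases xs with
    | nil => simp [PySem.Chars.join, List.intercalate]
    | cons y ys => simp_all [PySem.Chars.join, List.intercalate, List.intersperse]

def procJoin : Bool → List (List Char) → List Char
  | _, [] => []
  | b, p :: ps => (if b then p.filter (· ≠ ',') else p) ++ procJoin (!b) ps

theorem mod_two_cast (n : Nat) : (PySem.Int.mod (n : Int) 2 ≠ 0) ↔ (n % 2 = 1) := by
  have h : PySem.Int.mod (n : Int) 2 = ((n % 2 : Nat) : Int) := by
    simp [PySem.Int.mod, Int.fmod_eq_emod]
  rw [h]
  omega

theorem procJoin_enum (P : List (List Char)) (n : Nat) :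
    PySem.Chars.join [] ((PySem.List.enumerate P (n : Int)).foldl
      (fun (acc : List (List Char)) kx =>
        acc ++ [if PySem.Int.mod kx.1 2 ≠ 0 then PySem.Chars.replace kx.2 [','] [] else kx.2]) [])
    = procJoin (decide (n % 2 = 1)) P := by
  induction P generalizing n with
  | nil => simp [PySem.List.enumerate, procJoin, PySem.Chars.join, List.intercalate]
  | cons p ps ih =>
    rw [PySem.List.enumerate_cons]
    rw [List.foldl_cons]
    rw [PySem.List.foldl_append_singleton_eq_map]
    rw [join_nil_flatten]
    have hcast : ((n : Int) + 1) = ((n + 1 : Nat) : Int) := by push_cast; ring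
    have ih' := ih (n + 1)
    rw [PySem.List.foldl_append_singleton_eq_map] at ih'
    rw [join_nil_flatten] at ih'
    simp only [List.nil_append] at ih'
    simp only [List.nil_append, List.flatten_append, List.flatten_cons, List.flatten_nil, List.append_nil]
    rw [hcast, ih']
    have hpar : (decide ((n+1) % 2 = 1)) = !(decide (n % 2 = 1)) := by
      rcases Nat.even_or_odd n with h | h <;> simp [Nat.even_iff, Nat.odd_iff] at h <;>
        simp [h, Nat.succ_mod_two_eq_one_iff, Nat.succ_mod_two_eq_zero_iff] <;> omega
    simp only [procJoin, hpar]
    congr 1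
    by_cases hb : n % 2 = 1
    · rw [if_pos ((mod_two_cast n).mpr hb), replace_single]
      simp [hb]
    · rw [if_neg (fun h => hb ((mod_two_cast n).mp h))]
      simp [hb]

def keptCommas : Bool → List Char → Nat
  | _, [] => 0
  | b, c :: cs =>
    if c = '"' then keptCommas (!b) cs
    else if c = ',' ∧ b = false then keptCommas b cs + 1
    else keptCommas b cs

theorem count_procJoin_splitC (cs : List Char) (b : Bool) :
    (procJoin b (splitC '"' cs)).count ',' = keptCommas b cs := by
  induction cs generalizing b with
  | nil => cases b <;> simp [splitC, procJoin, keptCommas]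
  | cons c rest ih =>
    by_cases hq : c = '"'
    · subst hq
      simp only [splitC, if_pos rfl, keptCommas, procJoin]
      rw [← ih (!b)]
      cases b <;> simp [procJoin]
    · obtain ⟨p, ps, hp⟩ : ∃ p ps, splitC '"' rest = p :: ps := by
        cases h : splitC '"' rest with
        | nil => exact absurd h (splitC_ne_nil _ rest)
        | cons p ps => exact ⟨p, ps, rfl⟩
      have ih' := ih b
      rw [hp] at ih'
      simp only [splitC, if_neg hq, hp, consH, procJoin] at ih' ⊢
      cases b with
      | false =>
        simp only [keptCommas, if_neg hq, Bool.not_false] at *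
        by_cases hc : c = ','
        · simp [hc, List.count_cons, List.count_append] at ih' ⊢; omega
        · simp [hc, List.count_cons, List.count_append] at ih' ⊢; omega
      | true =>
        simp only [keptCommas, if_neg hq] at *
        by_cases hc : c = ','
        · simp [hc, List.count_append, List.filter_cons] at ih' ⊢; omega
        · simp [hc, List.count_append, List.filter_cons, List.count_cons] at ih' ⊢; omega

def stepB (p : Bool × Int) (ch : Char) : Bool × Int :=
  if ch = '"' then (!p.1, p.2) else if ch = ',' ∧ p.1 = false then (p.1, p.2 + 1) else p

theorem foldB (l : List Char) (b : Bool) (n : Int) :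
    (l.foldl stepB (b, n)).2 = n + (keptCommas b l : Int) := by
  induction l generalizing b n with
  | nil => simp [keptCommas]
  | cons c cs ih =>
    by_cases hq : c = '"'
    · subst hq
      have h : stepB (b, n) '"' = (!b, n) := by simp [stepB]
      rw [List.foldl_cons, h, ih]
      simp [keptCommas]
    · by_cases hc : c = ',' ∧ b = false
      · have h : stepB (b, n) c = (b, n + 1) := by simp [stepB, hq, hc]
        rw [List.foldl_cons, h, ih]
        simp [keptCommas, hq, hc]
        push_cast
        ring
      · have h : stepB (b, n) c = (b, n) := by simp [stepB, hq, hc]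
        rw [List.foldl_cons, h, ih]
        simp only [keptCommas, if_neg hq, if_neg hc]

theorem a_eq_b (line : String) : get_value_count line = get_value_count_alt line := by
  show ((PySem.Chars.splitOn (PySem.Chars.join []
      ((PySem.List.enumerate (PySem.Chars.splitOn line.toList ['"'])).foldl
        (fun (acc : List (List Char)) kx =>
          acc ++ [if PySem.Int.mod kx.1 2 ≠ 0 then PySem.Chars.replace kx.2 [','] [] else kx.2]) []))
      [',']).length : Int)
    = (line.toList.foldl stepB (false, 0)).2 + 1
  rw [splitOn_single '"' line.toList]
  have he : PySem.List.enumerate (splitC '"' line.toList) 0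
      = PySem.List.enumerate (splitC '"' line.toList) ((0 : Nat) : Int) := by norm_num
  rw [he, procJoin_enum (splitC '"' line.toList) 0,
      splitOn_single ',', length_splitC]
  norm_num [count_procJoin_splitC, foldB]

-- ===== VERDICT (by name: the statement is the Claim_ definition above) =====
theorem get_value_count_spec : Claim_equal_get_value_count := by
  intro line _
  unfold Spec_get_value_count
  exact a_eq_b line
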